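-- pv_equiv track=rewrite | github.com/albazzaztariq/UniLogic | XPile 3-17/Programs/sorted_list.py | sl_get
-- ===== SOURCE A (Python) =====
-- def sl_get(data, sub_start, sub_len, state, idx):
--     remaining = idx
--     num_subs = state[0]
--     for s in range(num_subs):
--         if (remaining < sub_len[s]):
--             return data[(sub_start[s] + remaining)]
--         remaining = (remaining - sub_len[s])
--     return 0
-- ===== SOURCE B (Python) =====
-- def sl_get(data, sub_start, sub_len, state, idx):
--     num_subs = state[0]
--     cum = []
--     total = 0
--     for s in range(num_subs):
--         total += sub_len[s]
--         cum.append(total)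
--     lo = 0
--     hi = len(cum)
--     while lo < hi:
--         mid = (lo + hi) // 2
--         if idx < cum[mid]:
--             hi = mid
--         else:
--             lo = mid + 1
--     if lo == len(cum):
--         return 0
--     return data[sub_start[lo] + idx - (cum[lo] - sub_len[lo])]
-- ===== Notes on version B (the rewrite author's own statement) =====
-- stated objective: alternative
-- what changed: Replaces A's linear subtract-scan with a one-time cumulative-sum table plus a hand-written binary search (bisect_right) over it to locate the containing sublist.
-- outside the precondition, e.g. on sl_get([7], [0], [5], [2], 0): A returns 7, B raises IndexError; on sl_get([9, 8], [0, 0, 0], [2, -5, 4], [3], 1): A returns 8, B returns 0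
import Mathlib
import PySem

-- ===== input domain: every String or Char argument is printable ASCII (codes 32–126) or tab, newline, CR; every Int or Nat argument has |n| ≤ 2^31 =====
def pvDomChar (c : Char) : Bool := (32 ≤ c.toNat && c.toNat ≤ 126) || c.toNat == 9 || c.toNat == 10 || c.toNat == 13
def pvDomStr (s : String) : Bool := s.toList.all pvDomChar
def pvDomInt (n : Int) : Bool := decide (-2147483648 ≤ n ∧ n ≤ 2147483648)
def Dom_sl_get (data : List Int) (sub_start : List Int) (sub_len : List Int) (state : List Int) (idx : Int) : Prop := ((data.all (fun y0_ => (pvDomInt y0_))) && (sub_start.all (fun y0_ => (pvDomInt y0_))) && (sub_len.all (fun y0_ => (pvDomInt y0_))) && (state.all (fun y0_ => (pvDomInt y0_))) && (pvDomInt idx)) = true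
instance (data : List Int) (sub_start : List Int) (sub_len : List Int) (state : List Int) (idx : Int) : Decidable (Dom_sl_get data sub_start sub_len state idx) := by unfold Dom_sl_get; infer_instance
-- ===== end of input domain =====

-- B replaces A's linear subtract-scan with a cumulative-length table plus binary search (alternative algorithm, same exact result).

-- ===== PORT A =====
-- A's for-loop over range(num_subs) with early return, as structural recursion on the range list.
def slGetLoopA (data : List Int) (sub_start : List Int) (sub_len : List Int) :
    List Int → Int → Int
  | [], _ => 0
  | s :: rest, remaining =>
    if remaining < PySem.List.pyGetD sub_len s 0 then
      PySem.List.pyGetD data (PySem.List.pyGetD sub_start s 0 + remaining) 0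
    else
      slGetLoopA data sub_start sub_len rest (remaining - PySem.List.pyGetD sub_len s 0)

def sl_get (data : List Int) (sub_start : List Int) (sub_len : List Int) (state : List Int) (idx : Int) : Int :=
  slGetLoopA data sub_start sub_len
    (PySem.List.pyRange 0 (PySem.List.pyGetD state 0 0) 1) idx

-- ===== PORT B =====
-- B's first loop: build the cumulative-length list cum (carrying the running total).
def cumOf (sub_len : List Int) (num_subs : Int) : List Int :=
  ((PySem.List.pyRange 0 num_subs 1).foldl
    (fun (acc : Int × List Int) s =>
      (acc.1 + PySem.List.pyGetD sub_len s 0,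
       acc.2 ++ [acc.1 + PySem.List.pyGetD sub_len s 0])) ((0 : Int), ([] : List Int))).2

-- B's while-loop: bisect_right on cum (lo, hi as in Source B; mid = (lo+hi)//2).
def bsearchLoop (cum : List Int) (idx : Int) (lo hi : Nat) : Nat :=
  if _h : lo < hi then
    if idx < PySem.List.pyGetD cum ((lo + hi) / 2 : Nat) 0 then
      bsearchLoop cum idx lo ((lo + hi) / 2)
    else
      bsearchLoop cum idx ((lo + hi) / 2 + 1) hi
  else lo
termination_by hi - lo
decreasing_by all_goals omega

def sl_get_alt (data : List Int) (sub_start : List Int) (sub_len : List Int) (state : List Int) (idx : Int) : Int :=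
  let cum := cumOf sub_len (PySem.List.pyGetD state 0 0)
  let lo := bsearchLoop cum idx 0 cum.length
  if lo = cum.length then 0
  else
    PySem.List.pyGetD data
      (PySem.List.pyGetD sub_start (lo : Int) 0 + idx -
        (PySem.List.pyGetD cum (lo : Int) 0 - PySem.List.pyGetD sub_len (lo : Int) 0)) 0

-- ===== PRECONDITION & SPEC =====
-- Pre_ excludes exactly: state = [] (A raises IndexError); and, at the first sublist s containing idx,
-- an out-of-range sub_start index or data index (A raises IndexError there).  It further restricts to the
-- natural domain in two stated ways: state[0] ≤ len(sub_len) (A can return early with a shorter sub_len,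
-- but B's table build reads all of sub_len[0:state[0]] and raises), and nonnegative sub_len entries
-- (lengths are naturally nonnegative; on negative entries the table is unsorted and binary search may
-- disagree with A's scan) — see the cites in the claim.
def Pre_sl_get (data : List Int) (sub_start : List Int) (sub_len : List Int) (state : List Int) (idx : Int) : Prop :=
  state ≠ [] ∧
  state.headI.toNat ≤ sub_len.length ∧
  (∀ s : Nat, s < state.headI.toNat → 0 ≤ sub_len.getD s 0) ∧
  (∀ s : Nat, s < state.headI.toNat →
    (∀ t : Nat, t < s → (sub_len.take (t+1)).sum ≤ idx) →
    idx < (sub_len.take (s+1)).sum →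
    s < sub_start.length ∧
    PySem.Raise.InRange data.length (sub_start.getD s 0 + (idx - (sub_len.take s).sum)))

instance (data : List Int) (sub_start : List Int) (sub_len : List Int) (state : List Int) (idx : Int) : Decidable (Pre_sl_get data sub_start sub_len state idx) := by
  unfold Pre_sl_get; infer_instance

def pvWitness_sl_get : List Int × List Int × List Int × List Int × Int :=
  ([5, 6, 7, 8], [0, 1], [2, 3], [2], 4)

def Spec_sl_get (data : List Int) (sub_start : List Int) (sub_len : List Int) (state : List Int) (idx : Int) (out : Int) : Prop := out = sl_get_alt data sub_start sub_len state idx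
instance (data : List Int) (sub_start : List Int) (sub_len : List Int) (state : List Int) (idx : Int) (out : Int) : Decidable (Spec_sl_get data sub_start sub_len state idx out) := by unfold Spec_sl_get; infer_instance

-- ===== CLAIM (what is proved, stated in full; the proofs are below) =====
def Claim_equal_sl_get : Prop := ∀ (data : List Int) (sub_start : List Int) (sub_len : List Int) (state : List Int) (idx : Int), Dom_sl_get data sub_start sub_len state idx → Pre_sl_get data sub_start sub_len state idx → Spec_sl_get data sub_start sub_len state idx (sl_get data sub_start sub_len state idx)

-- ===== LEMMAS AND PROOFS =====

-- prefix sums of sub_len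
theorem pvP_succ (sub_len : List Int) (s : Nat) :
    (sub_len.take (s+1)).sum = (sub_len.take s).sum + sub_len.getD s 0 := by
  by_cases h : s < sub_len.length
  · rw [List.sum_take_succ _ _ h, List.getD_eq_getElem?_getD, List.getElem?_eq_getElem h,
        Option.getD_some]
  · rw [List.take_of_length_le (by omega), List.take_of_length_le (by omega),
        List.getD_eq_default _ _ (by omega)]
    simp

theorem pvP_mono (sub_len : List Int) (n : Nat)
    (hnn : ∀ s : Nat, s < n → 0 ≤ sub_len.getD s 0) :
    ∀ s t : Nat, s ≤ t → t ≤ n → (sub_len.take s).sum ≤ (sub_len.take t).sum := by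
  intro s t hst htn
  induction t with
  | zero => interval_cases s; exact le_refl _
  | succ t ih =>
    rcases Nat.lt_or_ge s (t+1) with h | h
    · have h1 := ih (by omega) (by omega)
      have h2 := hnn t (by omega)
      rw [pvP_succ]; omega
    · have : s = t + 1 := by omega
      subst this; exact le_refl _

theorem pvCum_eq (sub_len : List Int) (m : Int) :
    cumOf sub_len m = (List.range m.toNat).map (fun s => (sub_len.take (s+1)).sum) := by
  unfold cumOf
  rw [PySem.List.pyRange_one]
  simp only [sub_zero, zero_add]
  have key : ∀ (k : Nat),
      (((List.range k).map (fun j : Nat => (j : Int))).foldl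
        (fun (acc : Int × List Int) s =>
          (acc.1 + PySem.List.pyGetD sub_len s 0,
           acc.2 ++ [acc.1 + PySem.List.pyGetD sub_len s 0])) ((0 : Int), ([] : List Int)))
      = ((sub_len.take k).sum, (List.range k).map (fun s => (sub_len.take (s+1)).sum)) := by
    intro k
    induction k with
    | zero => simp
    | succ k ih =>
      rw [List.range_succ, List.map_append, List.foldl_append, ih]
      simp [PySem.List.pyGetD_natCast, pvP_succ]
  rw [key]

-- binary-search specification: the result is the first index whose cum value exceeds idx
theorem pvBsearch_spec (cum : List Int) (idx : Int)
    (hmono : ∀ i j : Nat, i ≤ j → j < cum.length → cum.getD i 0 ≤ cum.getD j 0) :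
    ∀ (k lo hi : Nat), hi - lo ≤ k → hi ≤ cum.length → lo ≤ hi →
    (∀ i : Nat, i < lo → cum.getD i 0 ≤ idx) →
    (∀ i : Nat, hi ≤ i → i < cum.length → idx < cum.getD i 0) →
    (∀ i : Nat, i < bsearchLoop cum idx lo hi → cum.getD i 0 ≤ idx) ∧
    (bsearchLoop cum idx lo hi < cum.length → idx < cum.getD (bsearchLoop cum idx lo hi) 0) ∧
    bsearchLoop cum idx lo hi ≤ cum.length := by
  intro k
  induction k with
  | zero =>
    intro lo hi hk hhl hlh hlo hhi
    have hle : hi = lo := by omega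
    subst hle
    rw [bsearchLoop, dif_neg (show ¬ hi < hi from by omega)]
    exact ⟨hlo, fun h => hhi hi (le_refl hi) h, hhl⟩
  | succ k ih =>
    intro lo hi hk hhl hlh hlo hhi
    by_cases h : lo < hi
    · rw [bsearchLoop, dif_pos h]
      have hmid1 : lo ≤ (lo + hi) / 2 := by omega
      have hmid2 : (lo + hi) / 2 < hi := by omega
      have hgc : PySem.List.pyGetD cum (((lo + hi) / 2 : Nat) : Int) 0
          = cum.getD ((lo + hi) / 2) 0 := by
        rw [PySem.List.pyGetD_natCast]
      by_cases hc : idx < PySem.List.pyGetD cum (((lo + hi) / 2 : Nat) : Int) 0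
      · rw [if_pos hc]
        refine ih lo ((lo + hi) / 2) (by omega) (by omega) (by omega) hlo ?_
        intro i hi1 hi2
        calc idx < cum.getD ((lo + hi) / 2) 0 := hgc ▸ hc
          _ ≤ cum.getD i 0 := hmono _ _ hi1 hi2
      · rw [if_neg hc]
        refine ih ((lo + hi) / 2 + 1) hi (by omega) hhl (by omega) ?_ hhi
        intro i hi1
        calc cum.getD i 0 ≤ cum.getD ((lo + hi) / 2) 0 :=
              hmono _ _ (by omega) (by omega)
          _ ≤ idx := by rw [← hgc]; omega
    · rw [bsearchLoop, dif_neg h]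
      exact ⟨fun i hi' => hlo i hi', fun h' => hhi lo (by omega) h', by omega⟩

-- A's loop, started at position s0 with remaining = idx - prefix(s0), lands exactly at the
-- first-hit index r characterised by the binary-search postconditions.
theorem pvAloop_spec (data sub_start sub_len : List Int) (idx : Int) (n : Nat)
    (_hnlen : n ≤ sub_len.length) (r : Nat) (hrn : r ≤ n)
    (hlo : ∀ i : Nat, i < r → (sub_len.take (i+1)).sum ≤ idx)
    (hhit : r < n → idx < (sub_len.take (r+1)).sum) :
    ∀ (k s0 : Nat), n - s0 ≤ k → s0 ≤ r →
    slGetLoopA data sub_start sub_len ((List.range' s0 (n - s0)).map (fun j : Nat => (j : Int)))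
        (idx - (sub_len.take s0).sum)
      = (if r = n then 0
         else PySem.List.pyGetD data
           (PySem.List.pyGetD sub_start (r : Int) 0 + (idx - (sub_len.take r).sum)) 0) := by
  intro k
  induction k with
  | zero =>
    intro s0 hk hs0
    rw [show n - s0 = 0 from by omega]
    simp [slGetLoopA, show r = n from by omega]
  | succ k ih =>
    intro s0 hk hs0
    by_cases hlt : s0 < n
    · rw [show n - s0 = (n - (s0+1)) + 1 from by omega, List.range'_succ, List.map_cons,
          slGetLoopA, PySem.List.pyGetD_natCast sub_len]
      by_cases hcond : idx - (sub_len.take s0).sum < sub_len.getD s0 0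
      · have hs0r : r = s0 := by
          by_contra hne
          have hlt2 : s0 < r := by omega
          have h1 := hlo s0 hlt2
          have h2 := pvP_succ sub_len s0
          omega
        rw [if_pos hcond, if_neg (show ¬ r = n from by omega), hs0r]
      · have hs0r : s0 ≠ r := by
          intro he
          have h1 := hhit (he ▸ hlt)
          rw [← he] at h1
          have h2 := pvP_succ sub_len s0
          omega
        rw [if_neg hcond,
            show idx - (sub_len.take s0).sum - sub_len.getD s0 0
              = idx - (sub_len.take (s0+1)).sum from by have := pvP_succ sub_len s0; omega]
        exact ih (s0+1) (by omega) (by omega)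
    · rw [show n - s0 = 0 from by omega]
      simp [slGetLoopA, show r = n from by omega]

-- ===== VERDICT (by name: the statement is the Claim_ definition above) =====
theorem sl_get_spec : Claim_equal_sl_get := by
  intro data sub_start sub_len state idx _hdom hpre
  obtain ⟨hne, hnlen, hnn, _hsafe⟩ := hpre
  unfold Spec_sl_get sl_get sl_get_alt
  have hstate : PySem.List.pyGetD state 0 0 = state.headI := by
    cases state with
    | nil => exact absurd rfl hne
    | cons x xs => simp [PySem.List.pyGetD_zero_cons]
  rw [hstate]
  dsimp only
  set nI : Int := state.headI with hnI
  set n : Nat := nI.toNat with hn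
  have hcum : cumOf sub_len nI = (List.range n).map (fun s => (sub_len.take (s+1)).sum) :=
    pvCum_eq sub_len nI
  have hcumlen : (cumOf sub_len nI).length = n := by rw [hcum]; simp
  have hcumget : ∀ i : Nat, i < n →
      (cumOf sub_len nI).getD i 0 = (sub_len.take (i+1)).sum := by
    intro i hi
    rw [hcum, List.getD_eq_getElem?_getD]
    simp [hi]
  have hmono : ∀ i j : Nat, i ≤ j → j < (cumOf sub_len nI).length →
      (cumOf sub_len nI).getD i 0 ≤ (cumOf sub_len nI).getD j 0 := by
    intro i j hij hj
    rw [hcumlen] at hj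
    rw [hcumget i (by omega), hcumget j hj]
    exact pvP_mono sub_len n hnn (i+1) (j+1) (by omega) (by omega)
  obtain ⟨hrlo, hrhit, hrle⟩ :=
    pvBsearch_spec (cumOf sub_len nI) idx hmono (cumOf sub_len nI).length 0
      (cumOf sub_len nI).length (by omega) (le_refl _) (by omega)
      (fun i hi => absurd hi (by omega)) (fun i hi1 hi2 => absurd (lt_of_le_of_lt hi1 hi2) (lt_irrefl _))
  set R : Nat := bsearchLoop (cumOf sub_len nI) idx 0 (cumOf sub_len nI).length with hR
  have hrle' : R ≤ n := le_trans hrle (le_of_eq hcumlen)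
  have hrlo' : ∀ i : Nat, i < R → (sub_len.take (i+1)).sum ≤ idx := by
    intro i hi
    have h1 := hrlo i hi
    rwa [hcumget i (by omega)] at h1
  have hrhit' : R < n → idx < (sub_len.take (R+1)).sum := by
    intro h
    have h1 := hrhit (by omega)
    rwa [hcumget R h] at h1
  have hA := pvAloop_spec data sub_start sub_len idx n hnlen R hrle' hrlo' hrhit'
      n 0 (by omega) (by omega)
  simp only [Nat.sub_zero, List.take_zero, List.sum_nil, sub_zero] at hA
  have hrange : PySem.List.pyRange 0 nI 1 = (List.range' 0 n).map (fun j : Nat => (j : Int)) := by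
    rw [PySem.List.pyRange_one]
    simp [← List.range_eq_range', hn]
  rw [hrange, hA, hcumlen]
  by_cases hrn : R = n
  · simp [hrn]
  · rw [if_neg hrn, if_neg hrn, PySem.List.pyGetD_natCast (cumOf sub_len nI),
        PySem.List.pyGetD_natCast sub_len, hcumget R (by omega)]
    have := pvP_succ sub_len R
    congr 1
    omega
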